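-- pv_equiv track=rewrite | github.com/romeo111/cancer-autoresearch | tests/test_ukraine_registration.py | _count_states
-- ===== SOURCE A (Python) =====
-- from typing import Iterable
--
-- def _ua_block(drug: dict) -> dict:
--     """Convenience accessor for the per-drug ukraine_registration dict.
--     Returns {} when the block is absent (so callers can assert against
--     the actual key value)."""
--     rs = drug.get("regulatory_status") or {}
--     return rs.get("ukraine_registration") or {}
--
-- def _count_states(drug_yamls: Iterable[tuple[str, dict, str]]) -> dict[str, int]:
--     counts = {"total": 0, "registered": 0, "reimbursed": 0, "oop": 0, "not_registered": 0}
--     for _path, drug, _raw in drug_yamls: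
--         ua = _ua_block(drug)
--         counts["total"] += 1
--         reg = bool(ua.get("registered"))
--         reim = bool(ua.get("reimbursed_nszu"))
--         if reg:
--             counts["registered"] += 1
--         if reim:
--             counts["reimbursed"] += 1
--         if reg and not reim:
--             counts["oop"] += 1
--         if not reg:
--             counts["not_registered"] += 1
--     return counts
-- ===== SOURCE B (Python) =====
-- def _ua_block(drug: dict) -> dict:
--     rs = drug.get("regulatory_status") or {}
--     return rs.get("ukraine_registration") or {}
--
-- def _flags(item):
--     ua = _ua_block(item[1])
--     return bool(ua.get("registered")), bool(ua.get("reimbursed_nszu"))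
--
-- def _count_states(drug_yamls):
--     flags = [_flags(item) for item in drug_yamls]
--     return {
--         "total": len(flags),
--         "registered": sum(r for r, _ in flags),
--         "reimbursed": sum(m for _, m in flags),
--         "oop": sum(1 for r, m in flags if r and not m),
--         "not_registered": sum(1 for r, _ in flags if not r),
--     }
-- ===== Notes on version B (the rewrite author's own statement) =====
-- stated objective: simpler
-- what changed: Replaces A's single fused loop that mutates a five-key counter dict with one pass materializing per-drug (registered, reimbursed) flag pairs and then five independent reductions (len / sums over the flag list) building the result dict directly.
import Mathlib
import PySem

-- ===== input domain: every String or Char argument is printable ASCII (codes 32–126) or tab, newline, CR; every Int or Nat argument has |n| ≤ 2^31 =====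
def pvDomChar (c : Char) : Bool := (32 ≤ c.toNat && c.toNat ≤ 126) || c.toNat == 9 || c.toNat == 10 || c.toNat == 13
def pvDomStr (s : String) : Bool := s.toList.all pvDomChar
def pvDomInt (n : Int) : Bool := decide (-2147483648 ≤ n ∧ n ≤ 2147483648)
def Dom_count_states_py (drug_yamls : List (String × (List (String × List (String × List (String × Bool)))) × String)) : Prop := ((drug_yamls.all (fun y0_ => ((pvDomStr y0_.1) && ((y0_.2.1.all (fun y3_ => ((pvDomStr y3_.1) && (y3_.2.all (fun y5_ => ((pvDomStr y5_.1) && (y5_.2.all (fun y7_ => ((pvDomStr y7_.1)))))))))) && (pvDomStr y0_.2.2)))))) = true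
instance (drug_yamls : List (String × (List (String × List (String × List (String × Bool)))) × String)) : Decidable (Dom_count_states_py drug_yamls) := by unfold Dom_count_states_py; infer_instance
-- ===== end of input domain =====

-- B replaces A's single fused counter-dict loop by one map producing per-drug (reg, reim)
-- flag pairs followed by independent reductions (length / filtered lengths); objective: simpler.

-- ===== PORT A =====
-- shared helper: Python _ua_block. 'x or {}' yields {} exactly when the lookup is None or the
-- stored dict is empty; both cases coincide with (get?).getD [] here, since {} = [].
def pvUaBlock (drug : List (String × List (String × List (String × Bool)))) : List (String × Bool) :=
  let rs := ((PySem.Dict.mk drug).get? "regulatory_status").getD []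
  ((PySem.Dict.mk rs).get? "ukraine_registration").getD []

-- loop body of A's for-loop over the counts dict, split on the two booleans reg / reim
def pvStepCore (counts : PySem.Dict String Int) (reg reim : Bool) : PySem.Dict String Int :=
  let counts := counts.modify "total" 0 (· + 1)
  let counts := if reg then counts.modify "registered" 0 (· + 1) else counts
  let counts := if reim then counts.modify "reimbursed" 0 (· + 1) else counts
  let counts := if reg && !reim then counts.modify "oop" 0 (· + 1) else counts
  let counts := if !reg then counts.modify "not_registered" 0 (· + 1) else counts
  counts

def pvStepA (counts : PySem.Dict String Int)
    (item : String × (List (String × List (String × List (String × Bool)))) × String) :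
    PySem.Dict String Int :=
  let ua := PySem.Dict.mk (pvUaBlock item.2.1)
  pvStepCore counts ((ua.get? "registered").getD false) ((ua.get? "reimbursed_nszu").getD false)

def count_states_py (drug_yamls : List (String × (List (String × List (String × List (String × Bool)))) × String)) : List (String × Int) :=
  let counts : PySem.Dict String Int :=
    PySem.Dict.mk [("total", 0), ("registered", 0), ("reimbursed", 0), ("oop", 0), ("not_registered", 0)]
  (drug_yamls.foldl pvStepA counts).items

-- ===== PORT B =====
-- Python _flags: the per-drug (reg, reim) pair
def pvFlags (item : String × (List (String × List (String × List (String × Bool)))) × String) : Bool × Bool :=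
  let ua := PySem.Dict.mk (pvUaBlock item.2.1)
  (((ua.get? "registered").getD false), ((ua.get? "reimbursed_nszu").getD false))

def count_states_py_alt (drug_yamls : List (String × (List (String × List (String × List (String × Bool)))) × String)) : List (String × Int) :=
  let flags := drug_yamls.map pvFlags
  [("total", (flags.length : Int)),
   ("registered", ((flags.filter (fun f => f.1)).length : Int)),
   ("reimbursed", ((flags.filter (fun f => f.2)).length : Int)),
   ("oop", ((flags.filter (fun f => f.1 && !f.2)).length : Int)),
   ("not_registered", ((flags.filter (fun f => !f.1)).length : Int))]

-- ===== PRECONDITION & SPEC =====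
def Spec_count_states_py (drug_yamls : List (String × (List (String × List (String × List (String × Bool)))) × String)) (out : List (String × Int)) : Prop := out = count_states_py_alt drug_yamls
instance (drug_yamls : List (String × (List (String × List (String × List (String × Bool)))) × String)) (out : List (String × Int)) : Decidable (Spec_count_states_py drug_yamls out) := by unfold Spec_count_states_py; infer_instance

-- ===== CLAIM (what is proved, stated in full; the proofs are below) =====
def Claim_equal_count_states_py : Prop := ∀ (drug_yamls : List (String × (List (String × List (String × List (String × Bool)))) × String)), Dom_count_states_py drug_yamls → Spec_count_states_py drug_yamls (count_states_py drug_yamls)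

-- ===== LEMMAS AND PROOFS =====

-- loop invariant for A: folding pvStepA over l from an accumulator dict with the five literal
-- keys adds to each slot exactly the corresponding filtered count of the flag pairs of l
lemma pvStepA_foldl (l : List (String × (List (String × List (String × List (String × Bool)))) × String))
    (a b c d e : Int) :
    l.foldl pvStepA (PySem.Dict.mk
        [("total", a), ("registered", b), ("reimbursed", c), ("oop", d), ("not_registered", e)])
    = PySem.Dict.mk
        [("total", a + ((l.map pvFlags).length : Int)),
         ("registered", b + (((l.map pvFlags).filter (fun f => f.1)).length : Int)),
         ("reimbursed", c + (((l.map pvFlags).filter (fun f => f.2)).length : Int)),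
         ("oop", d + (((l.map pvFlags).filter (fun f => f.1 && !f.2)).length : Int)),
         ("not_registered", e + (((l.map pvFlags).filter (fun f => !f.1)).length : Int))] := by
  induction l generalizing a b c d e with
  | nil => simp
  | cons x xs ih =>
    have hcore : ∀ (reg reim : Bool), pvStepCore (PySem.Dict.mk
        [("total", a), ("registered", b), ("reimbursed", c), ("oop", d), ("not_registered", e)]) reg reim
      = PySem.Dict.mk
        [("total", a + 1),
         ("registered", b + if reg then 1 else 0),
         ("reimbursed", c + if reim then 1 else 0),
         ("oop", d + if reg && !reim then 1 else 0),
         ("not_registered", e + if !reg then 1 else 0)] := by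
      intro reg reim
      cases reg <;> cases reim <;> simp [pvStepCore, PySem.Dict.modify, PySem.Dict.get?, PySem.Dict.insert, PySem.Dict.getD]
    have hstep : pvStepA (PySem.Dict.mk
        [("total", a), ("registered", b), ("reimbursed", c), ("oop", d), ("not_registered", e)]) x
      = pvStepCore (PySem.Dict.mk
        [("total", a), ("registered", b), ("reimbursed", c), ("oop", d), ("not_registered", e)])
        (pvFlags x).1 (pvFlags x).2 := rfl
    rw [List.foldl_cons, hstep, hcore, ih]
    rcases h1 : (pvFlags x).1 <;> rcases h2 : (pvFlags x).2 <;>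
      simp [h1, h2] <;> omega

-- ===== VERDICT (by name: the statement is the Claim_ definition above) =====
theorem count_states_py_spec : Claim_equal_count_states_py := by
  intro drug_yamls _
  unfold Spec_count_states_py count_states_py count_states_py_alt
  simp only [pvStepA_foldl]
  simp
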